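-- pv_equiv track=rewrite | github.com/cliffxuan/nvim-config | lua/vibe-coding/python_impl/validation.py | _find_prefix_match
-- ===== SOURCE A (Python) =====
-- from typing import Dict, List, Optional, Tuple
--
-- def _find_prefix_match(
--     context_text: str,
--     original_lines: List[str],
--     hint_line_num: Optional[int] = None,
-- ) -> Optional[List[str]]:
--     """
--     Finds if context_text is a prefix of lines in the original file and extracts the split.
--
--     Args:
--         context_text: The potentially joined line
--         original_lines: Array of lines from the original file
--         hint_line_num: Optional hint for preferred line number
--
--     Returns:
--         Array of split lines that reconstruct the context_text, or None if no match
--     """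
--     if not original_lines or not context_text:
--         return None
--
--     # Remove leading/trailing whitespace for comparison
--     trimmed_context = context_text.strip()
--
--     # Collect all possible matches first
--     all_matches = []
--
--     # Try to find a sequence of original lines that when concatenated would create context_text
--     for start_idx in range(len(original_lines)):
--         matched_lines = []
--
--         # Try building up the context_text from consecutive original lines
--         for end_idx in range(start_idx, min(start_idx + 5, len(original_lines))):
--             orig_line = original_lines[end_idx]
--             trimmed_orig = orig_line.strip()
--
--             # Include all lines (even empty ones) in the match sequence
--             matched_lines.append(orig_line)
--
--             # Only process non-empty lines for matching
--             if trimmed_orig: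
--                 # Try direct concatenation of trimmed non-empty lines
--                 joined = ""
--                 for line in matched_lines:
--                     line_trimmed = line.strip()
--                     if line_trimmed:
--                         if not joined:
--                             joined = line_trimmed
--                         else:
--                             joined = joined + line_trimmed
--
--                 # Check if this matches our context text
--                 if joined == trimmed_context:
--                     all_matches.append(
--                         {
--                             "lines": matched_lines.copy(),
--                             "start_line": start_idx + 1,
--                             "end_line": end_idx + 1,
--                         }
--                     )
--
--     if not all_matches:
--         return None
--
--     # If we have multiple matches, prefer the one closest to the hint
--     if hint_line_num and len(all_matches) > 1:
--         best_match = all_matches[0]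
--         best_distance = abs(all_matches[0]["start_line"] - hint_line_num)
--
--         for match in all_matches:
--             distance = abs(match["start_line"] - hint_line_num)
--             if distance < best_distance:
--                 best_distance = distance
--                 best_match = match
--
--         return best_match["lines"]
--
--     # Return the first match if no hint provided
--     return all_matches[0]["lines"]
-- ===== SOURCE B (Python) =====
-- from typing import List, Optional
--
--
-- def _find_prefix_match(
--     context_text: str,
--     original_lines: List[str],
--     hint_line_num: Optional[int] = None,
-- ) -> Optional[List[str]]:
--     """Pointer-into-target matcher: instead of rebuilding concatenations, walk a
--     cursor through the stripped context and bail out on the first mismatch; then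
--     pick the start closest to the hint with min() instead of a manual best-fold."""
--     if not original_lines or not context_text:
--         return None
--
--     target = context_text.strip()
--     n = len(original_lines)
--
--     def span(s):
--         """If the window starting at s spells target, its line count; else None."""
--         pos = 0
--         for j in range(s, min(s + 5, n)):
--             chunk = original_lines[j].strip()
--             if not chunk:
--                 continue
--             if not target.startswith(chunk, pos):
--                 return None
--             pos += len(chunk)
--             if pos == len(target):
--                 return j - s + 1
--         return None
--
--     cands = [(s, k) for s in range(n) if (k := span(s)) is not None]
--     if not cands:
--         return None
--     if hint_line_num:
--         s, k = min(cands, key=lambda c: abs(c[0] + 1 - hint_line_num))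
--     else:
--         s, k = cands[0]
--     return original_lines[s : s + k]
-- ===== Notes on version B (the rewrite author's own statement) =====
-- stated objective: faster
-- what changed: Instead of rebuilding the concatenation of stripped lines for every (start,end) candidate, collecting all matches into dicts and folding for the hint-closest one, B walks a cursor through the stripped context (bailing out of a window on the first mismatching line), collects only the matching start indices, and selects with min(key=distance-to-hint).
import Mathlib
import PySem

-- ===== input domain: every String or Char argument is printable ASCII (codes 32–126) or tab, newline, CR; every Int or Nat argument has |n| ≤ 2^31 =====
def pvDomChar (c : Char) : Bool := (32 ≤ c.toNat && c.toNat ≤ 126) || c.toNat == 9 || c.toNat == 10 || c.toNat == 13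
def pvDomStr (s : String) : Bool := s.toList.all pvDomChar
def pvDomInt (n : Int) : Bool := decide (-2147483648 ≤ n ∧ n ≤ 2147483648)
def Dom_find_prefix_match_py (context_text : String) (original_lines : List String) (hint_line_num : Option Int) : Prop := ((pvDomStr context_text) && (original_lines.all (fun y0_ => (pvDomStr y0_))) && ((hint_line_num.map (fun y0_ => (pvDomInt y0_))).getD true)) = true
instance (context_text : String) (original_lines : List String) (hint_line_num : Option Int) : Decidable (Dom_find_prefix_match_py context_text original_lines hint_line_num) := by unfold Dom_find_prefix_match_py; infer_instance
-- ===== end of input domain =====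

-- B replaces A's rebuild-the-concatenation-per-candidate + collect-all-matches-then-best-fold
-- scheme by a cursor that consumes the stripped context in place (bailing out of a window on the
-- first mismatch) and a min-by-hint-distance selection over candidate start indices
-- (objective: faster — measured faster in a timing run).

-- ===== PORT A =====
-- A's innermost 'joined' loop, rebuilt from scratch over matched_lines (chars, so kernel-evaluable)
def pvStripJoinA (matched : List String) : List Char :=
  matched.foldl
    (fun joined line =>
      let t := PySem.Chars.strip line.toList
      if t ≠ [] then (if joined = [] then t else joined ++ t) else joined)
    []

-- A's inner loop over end_idx: up to `fuel` (= 5) consecutive lines of `suffix`; collects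
-- every match (matched_lines.copy(), start_line) in order.
def pvMatchesInner (trimmed : List Char) :
    List String → List String → Int → Nat → List (List String × Int)
  | [], _, _, _ => []
  | l :: rest, matched, startLine, fuel =>
    match fuel with
    | 0 => []
    | fuel + 1 =>
      let matched' := matched ++ [l]
      let tail := pvMatchesInner trimmed rest matched' startLine fuel
      if PySem.Chars.strip l.toList ≠ [] then
        if pvStripJoinA matched' = trimmed then (matched', startLine) :: tail else tail
      else tail

-- A's outer loop over start_idx (startLine = start_idx + 1)
def pvMatchesOuter (trimmed : List Char) : List String → Int → List (List String × Int)
  | [], _ => []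
  | l :: rest, startLine =>
    pvMatchesInner trimmed (l :: rest) [] startLine 5 ++ pvMatchesOuter trimmed rest (startLine + 1)

def find_prefix_match_py (context_text : String) (original_lines : List String)
    (hint_line_num : Option Int) : Option (List String) :=
  if original_lines = [] ∨ context_text = "" then none
  else
    let trimmed := PySem.Chars.strip context_text.toList
    match pvMatchesOuter trimmed original_lines 1 with
    | [] => none
    | m :: rest =>
      match hint_line_num with
      | some h =>
        -- 'if hint_line_num and len(all_matches) > 1'
        if h ≠ 0 ∧ rest ≠ [] then
          let best := (m :: rest).foldl
            (fun (b : (List String × Int) × Int) mm =>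
              let d := |mm.2 - h|
              if d < b.2 then (mm, d) else b)
            (m, |m.2 - h|)
          some best.1.1
        else some m.1
      | none => some m.1

-- ===== PORT B =====
-- B's span(s) loop: cursor pos into target; cnt counts consumed lines (j - s + 1).
-- 'target.startswith(chunk, pos)' is PySem.Chars.startswith on target.drop pos — exact here
-- since 0 ≤ pos ≤ len(target) throughout the loop.
def pvSpanGo (target : List Char) : Nat → Nat → Nat → List String → Option Nat
  | 0, _, _, _ => none
  | _ + 1, _, _, [] => none
  | fuel + 1, pos, cnt, l :: rest =>
    let chunk := PySem.Chars.strip l.toList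
    if chunk = [] then pvSpanGo target fuel pos (cnt + 1) rest
    else if PySem.Chars.startswith (target.drop pos) chunk then
      if pos + chunk.length = target.length then some (cnt + 1)
      else pvSpanGo target fuel (pos + chunk.length) (cnt + 1) rest
    else none

def pvSpan (target : List Char) (lines : List String) (s : Nat) : Option Nat :=
  pvSpanGo target 5 0 0 (lines.drop s)

-- '[(s, k) for s in range(n) if (k := span(s)) is not None]'
def pvCands (target : List Char) (lines : List String) : List (Nat × Nat) :=
  (List.range lines.length).filterMap (fun s => (pvSpan target lines s).map (fun k => (s, k)))

def find_prefix_match_py_alt (context_text : String) (original_lines : List String)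
    (hint_line_num : Option Int) : Option (List String) :=
  if original_lines = [] ∨ context_text = "" then none
  else
    let target := PySem.Chars.strip context_text.toList
    match pvCands target original_lines with
    | [] => none
    | c :: cs =>
      let sk :=
        match hint_line_num with
        | some h =>
          if h ≠ 0 then
            -- min(cands, key=…); the list is nonempty so getD's default is never used
            (PySem.List.min? (c :: cs) (fun x => |(x.1 : Int) + 1 - h|)).getD c
          else c
        | none => c
      -- original_lines[s : s + k] with 0 ≤ s, k — exactly drop s then take k
      some ((original_lines.drop sk.1).take sk.2)

-- ===== PRECONDITION & SPEC =====
def Spec_find_prefix_match_py (context_text : String) (original_lines : List String) (hint_line_num : Option Int) (out : Option (List String)) : Prop := out = find_prefix_match_py_alt context_text original_lines hint_line_num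
instance (context_text : String) (original_lines : List String) (hint_line_num : Option Int) (out : Option (List String)) : Decidable (Spec_find_prefix_match_py context_text original_lines hint_line_num out) := by unfold Spec_find_prefix_match_py; infer_instance

-- ===== CLAIM =====
def Claim_equal_find_prefix_match_py : Prop := ∀ (context_text : String) (original_lines : List String) (hint_line_num : Option Int), Dom_find_prefix_match_py context_text original_lines hint_line_num → Spec_find_prefix_match_py context_text original_lines hint_line_num (find_prefix_match_py context_text original_lines hint_line_num)

-- ===== LEMMAS AND PROOFS =====

-- A's rebuilt joined, pushed one step
theorem pvStripJoinA_append (chunk : List String) (l : String) :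
    pvStripJoinA (chunk ++ [l]) =
      (if PySem.Chars.strip l.toList = [] then pvStripJoinA chunk
       else pvStripJoinA chunk ++ PySem.Chars.strip l.toList) := by
  simp only [pvStripJoinA, List.foldl_append, List.foldl_cons, List.foldl_nil]
  split_ifs with h1 h2 <;> simp_all

-- once joined is no longer a prefix of target, A records nothing further from this start
theorem deadA (target : List Char) :
    ∀ (suffix : List String) (fuel : Nat) (chunk : List String) (sl : Int),
    ¬ (pvStripJoinA chunk <+: target) →
    pvMatchesInner target suffix chunk sl fuel = [] := by
  intro suffix
  induction suffix with
  | nil => intro fuel _ _ _; cases fuel <;> rfl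
  | cons l rest ih =>
    intro fuel chunk sl hnp
    cases fuel with
    | zero => rfl
    | succ fuel =>
      have hstep := pvStripJoinA_append chunk l
      by_cases ht : PySem.Chars.strip l.toList = []
      · rw [if_pos ht] at hstep
        simp only [pvMatchesInner, ht, ne_eq, not_true_eq_false, if_false]
        exact ih fuel (chunk ++ [l]) sl (by rw [hstep]; exact hnp)
      · rw [if_neg ht] at hstep
        have hnp' : ¬ (pvStripJoinA (chunk ++ [l]) <+: target) := by
          rw [hstep]; intro hp
          exact hnp ((List.prefix_append _ _).trans hp)
        have hne : pvStripJoinA (chunk ++ [l]) ≠ target := by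
          intro he; exact hnp' (he ▸ List.prefix_refl target)
        simp only [pvMatchesInner, ht, ne_eq, not_false_eq_true, if_true, if_neg hne]
        exact ih fuel (chunk ++ [l]) sl hnp'

-- the cursor can never complete once it sits at the end of target
theorem spanGo_at_end (target : List Char) :
    ∀ (suffix : List String) (fuel cnt : Nat),
    pvSpanGo target fuel target.length cnt suffix = none := by
  intro suffix
  induction suffix with
  | nil => intro fuel _; cases fuel <;> rfl
  | cons l rest ih =>
    intro fuel cnt
    cases fuel with
    | zero => rfl
    | succ fuel =>
      simp only [pvSpanGo, List.drop_length]
      by_cases ht : PySem.Chars.strip l.toList = []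
      · simp only [ht, if_true]; exact ih fuel (cnt + 1)
      · have : PySem.Chars.startswith ([] : List Char) (PySem.Chars.strip l.toList) = false := by
          rw [Bool.eq_false_iff]
          intro hs
          exact ht (List.prefix_nil.mp ((PySem.Chars.startswith_iff _ _).mp hs))
        simp [ht, this]

-- cnt is a pure offset
theorem spanGo_shift (target : List Char) :
    ∀ (suffix : List String) (fuel pos cnt : Nat),
    pvSpanGo target fuel pos cnt suffix = (pvSpanGo target fuel pos 0 suffix).map (· + cnt) := by
  intro suffix
  induction suffix with
  | nil => intro fuel _ _; cases fuel <;> rfl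
  | cons l rest ih =>
    intro fuel pos cnt
    cases fuel with
    | zero => rfl
    | succ fuel =>
      simp only [pvSpanGo]
      split_ifs with h1 h2 h3
      · rw [ih fuel pos (cnt + 1), ih fuel pos 1, Option.map_map]
        cases pvSpanGo target fuel pos 0 rest <;> (simp; try omega)
      · simp [Nat.add_comm]
      · rw [ih fuel _ (cnt + 1), ih fuel _ 1, Option.map_map]
        cases pvSpanGo target fuel _ 0 rest <;> (simp; try omega)
      · rfl

-- A's inner match list for one start is B's span, as an option
theorem inner_eq (target : List Char) :
    ∀ (suffix : List String) (fuel : Nat) (chunk : List String) (sl : Int) (pos : Nat),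
    pos ≤ target.length → pvStripJoinA chunk = target.take pos →
    pvMatchesInner target suffix chunk sl fuel =
      ((pvSpanGo target fuel pos 0 suffix).map (fun k => (chunk ++ suffix.take k, sl))).toList := by
  intro suffix
  induction suffix with
  | nil => intro fuel chunk sl pos _ _; cases fuel <;> rfl
  | cons l rest ih =>
    intro fuel chunk sl pos hle hjoin
    cases fuel with
    | zero => rfl
    | succ fuel =>
      have hstep := pvStripJoinA_append chunk l
      by_cases ht : PySem.Chars.strip l.toList = []
      · rw [if_pos ht] at hstep
        simp only [pvMatchesInner, pvSpanGo, ht, ne_eq, not_true_eq_false, if_false, if_true]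
        rw [ih fuel (chunk ++ [l]) sl pos hle (hstep.trans hjoin),
            spanGo_shift target rest fuel pos 1]
        cases pvSpanGo target fuel pos 0 rest <;> simp
      · by_cases hpf : PySem.Chars.strip l.toList <+: target.drop pos
        · have hts : PySem.Chars.startswith (target.drop pos) (PySem.Chars.strip l.toList) = true :=
            (PySem.Chars.startswith_iff _ _).mpr hpf
          have htake : (target.drop pos).take (PySem.Chars.strip l.toList).length
              = PySem.Chars.strip l.toList := (List.prefix_iff_eq_take.mp hpf).symm
          have hjoin' : pvStripJoinA (chunk ++ [l])
              = target.take (pos + (PySem.Chars.strip l.toList).length) := by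
            rw [hstep, if_neg ht, hjoin, List.take_add, htake]
          have hlenle : pos + (PySem.Chars.strip l.toList).length ≤ target.length := by
            have := hpf.length_le
            simp only [List.length_drop] at this
            omega
          by_cases hend : pos + (PySem.Chars.strip l.toList).length = target.length
          · have heq : pvStripJoinA (chunk ++ [l]) = target := by
              rw [hjoin', hend, List.take_length]
            have htail : pvMatchesInner target rest (chunk ++ [l]) sl fuel = [] := by
              rw [ih fuel (chunk ++ [l]) sl _ hlenle hjoin', hend, spanGo_at_end]
              rfl
            simp only [pvMatchesInner, pvSpanGo, ht, ne_eq, not_false_eq_true,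
              hts, hend, if_pos, heq, htail]
            simp
          · have hne : pvStripJoinA (chunk ++ [l]) ≠ target := by
              intro he
              have := congrArg List.length he
              rw [hjoin'] at this
              simp only [List.length_take] at this
              omega
            have hrec := ih fuel (chunk ++ [l]) sl _ hlenle hjoin'
            simp only [pvMatchesInner, pvSpanGo, ht, ne_eq, not_false_eq_true,
              hts, hend, if_neg, hne]
            rw [hrec, spanGo_shift target rest fuel _ 1]
            cases pvSpanGo target fuel (pos + (PySem.Chars.strip l.toList).length) 0 rest <;> simp
        · have hts : PySem.Chars.startswith (target.drop pos) (PySem.Chars.strip l.toList) = false := by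
            rw [Bool.eq_false_iff]
            intro hs
            exact hpf ((PySem.Chars.startswith_iff _ _).mp hs)
          have hnp : ¬ (pvStripJoinA (chunk ++ [l]) <+: target) := by
            rw [hstep, if_neg ht, hjoin]
            intro hp
            apply hpf
            have h2 : target.take pos ++ PySem.Chars.strip l.toList
                <+: target.take pos ++ target.drop pos := by
              rw [List.take_append_drop]; exact hp
            exact (List.prefix_append_right_inj _).mp h2
          have hne : pvStripJoinA (chunk ++ [l]) ≠ target := fun he =>
            hnp (he ▸ List.prefix_refl target)
          have htail := deadA target rest fuel (chunk ++ [l]) sl hnp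
          simp only [pvMatchesInner, pvSpanGo, ht, ne_eq, not_false_eq_true,
            hts, if_neg, hne, htail]
          simp [hts]

-- A's full match list is B's candidate list, embedded
theorem outer_eq (target : List Char) :
    ∀ (lines : List String) (sl : Int),
    pvMatchesOuter target lines sl =
      ((List.range lines.length).filterMap
        (fun i => (pvSpanGo target 5 0 0 (lines.drop i)).map (fun k => (i, k)))).map
        (fun c => ((lines.drop c.1).take c.2, sl + (c.1 : Int))) := by
  intro lines
  induction lines with
  | nil => intro sl; rfl
  | cons l rest ih =>
    intro sl
    have hhead := inner_eq target (l :: rest) 5 [] sl 0 (Nat.zero_le _) rfl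
    have hcong : ∀ i : Nat, i ∈ List.range rest.length →
        Option.map (fun c => ((List.drop c.1 rest).take c.2, sl + 1 + (c.1 : Int)))
            (Option.map (fun k => (i, k)) (pvSpanGo target 5 0 0 (List.drop i rest))) =
          Option.map (fun c => ((List.drop c.1 (l :: rest)).take c.2, sl + (c.1 : Int)))
            (Option.map (fun k => (i + 1, k)) (pvSpanGo target 5 0 0 (List.drop (i + 1) (l :: rest)))) := by
      intro i _
      rw [List.drop_succ_cons]
      cases pvSpanGo target 5 0 0 (List.drop i rest) <;> (simp; try ring)
    simp only [pvMatchesOuter, hhead, ih (sl + 1), List.length_cons,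
      List.range_succ_eq_map, List.filterMap_cons, List.filterMap_map, List.drop_zero,
      List.map_filterMap]
    cases hsp : pvSpanGo target 5 0 0 (l :: rest) with
    | none =>
      simp only [Option.map_none, Option.toList_none, List.nil_append, List.map_filterMap]
      refine List.filterMap_congr fun i hi => ?_
      simp only [Function.comp_apply, Nat.succ_eq_add_one]
      exact hcong i hi
    | some k =>
      simp only [Option.map_some, Option.toList_some, List.cons_append, List.nil_append,
        List.map_cons, List.map_filterMap]
      refine congrArg₂ List.cons (by simp) ?_
      refine List.filterMap_congr fun i hi => ?_
      simp only [Function.comp_apply, Nat.succ_eq_add_one]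
      exact hcong i hi

-- the two spellings of the distance key pick the same element
theorem foldmin_key_comm (h : Int) :
    ∀ (cs : List (Nat × Nat)) (c0 : Nat × Nat),
    cs.foldl (fun m x => if |(x.1 : Int) + 1 - h| < |(m.1 : Int) + 1 - h| then x else m) c0 =
      cs.foldl (fun m x => if |(1 : Int) + (x.1 : Int) - h| < |(1 : Int) + (m.1 : Int) - h| then x else m) c0 := by
  intro cs c0
  have hc : ∀ a b : Int, (|a + 1 - h| < |b + 1 - h|) = (|1 + a - h| < |1 + b - h|) := by
    intro a b
    rw [show a + 1 - h = 1 + a - h from by ring, show b + 1 - h = 1 + b - h from by ring]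
  simp only [hc]

-- A's best-fold over embedded candidates is the keep-first-strict-min fold over the candidates
theorem sel_eq (lines : List String) (h : Int) :
    ∀ (cs : List (Nat × Nat)) (c0 : Nat × Nat),
    (cs.map (fun c => (((lines.drop c.1).take c.2 : List String), (1 : Int) + (c.1 : Int)))).foldl
        (fun (b : (List String × Int) × Int) mm =>
          let d := |mm.2 - h|
          if d < b.2 then (mm, d) else b)
        ((((lines.drop c0.1).take c0.2 : List String), (1 : Int) + (c0.1 : Int)), |(1 : Int) + (c0.1 : Int) - h|) =
      ((((lines.drop (cs.foldl (fun m x => if |(1 : Int) + (x.1 : Int) - h| < |(1 : Int) + (m.1 : Int) - h| then x else m) c0).1).take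
          (cs.foldl (fun m x => if |(1 : Int) + (x.1 : Int) - h| < |(1 : Int) + (m.1 : Int) - h| then x else m) c0).2 : List String),
        (1 : Int) + ((cs.foldl (fun m x => if |(1 : Int) + (x.1 : Int) - h| < |(1 : Int) + (m.1 : Int) - h| then x else m) c0).1 : Int)),
       |(1 : Int) + ((cs.foldl (fun m x => if |(1 : Int) + (x.1 : Int) - h| < |(1 : Int) + (m.1 : Int) - h| then x else m) c0).1 : Int) - h|) := by
  intro cs
  induction cs with
  | nil => intro c0; rfl
  | cons x cs ih =>
    intro c0
    simp only [List.map_cons, List.foldl_cons]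
    by_cases hlt : |(1 : Int) + (x.1 : Int) - h| < |(1 : Int) + (c0.1 : Int) - h|
    · simp only [if_pos hlt]
      exact ih x
    · simp only [if_neg hlt]
      exact ih c0

-- PySem.List.min? on a nonempty list is the keep-first-strict-min fold
theorem min?_cons_fold (h : Int) (c0 : Nat × Nat) (cs : List (Nat × Nat)) :
    PySem.List.min? (c0 :: cs) (fun x => |(x.1 : Int) + 1 - h|) =
      some (cs.foldl (fun m x => if |(x.1 : Int) + 1 - h| < |(m.1 : Int) + 1 - h| then x else m) c0) := by
  rw [PySem.List.min?]
  simp only [List.foldl_cons]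
  induction cs generalizing c0 with
  | nil => rfl
  | cons c cs ih =>
    simp only [List.foldl_cons]
    by_cases hlt : |(c.1 : Int) + 1 - h| < |(c0.1 : Int) + 1 - h| <;> simp [hlt, ih]

-- ===== VERDICT =====
theorem find_prefix_match_py_spec : Claim_equal_find_prefix_match_py := by
  intro ctx lines hint _
  unfold Spec_find_prefix_match_py find_prefix_match_py find_prefix_match_py_alt
  by_cases hguard : lines = [] ∨ ctx = ""
  · simp [hguard]
  · simp only [if_neg hguard]
    have hM : pvMatchesOuter (PySem.Chars.strip ctx.toList) lines 1 =
        (pvCands (PySem.Chars.strip ctx.toList) lines).map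
          (fun c => ((lines.drop c.1).take c.2, (1 : Int) + (c.1 : Int))) := by
      rw [outer_eq]
      simp only [pvCands, pvSpan]
    rw [hM]
    cases hC : pvCands (PySem.Chars.strip ctx.toList) lines with
    | nil => rfl
    | cons c cs =>
      simp only [List.map_cons]
      cases hint with
      | none => rfl
      | some h =>
        dsimp only
        by_cases hh : h = 0
        · subst hh
          simp
        · cases cs with
          | nil =>
            simp [hh, PySem.List.min?]
          | cons c2 cs2 =>
            rw [min?_cons_fold h c (c2 :: cs2), Option.getD_some, foldmin_key_comm]
            rw [if_pos (show h ≠ 0 ∧ List.map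
                (fun c => ((lines.drop c.1).take c.2, (1 : Int) + (c.1 : Int))) (c2 :: cs2) ≠ []
              from ⟨hh, by simp⟩)]
            simp only [List.foldl_cons, lt_irrefl, if_false]
            rw [sel_eq lines h (c2 :: cs2) c]
            simp [hh]
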